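-- pv_equiv track=rewrite | github.com/TryDotAtwo/ML-in-Math | src/heuristics/h_functions.py | _has_gap_decreasing_move
-- ===== SOURCE A (Python) =====
-- from typing import List, Callable
--
-- def _has_gap_decreasing_move(state: List[int]) -> bool:
--     """Проверяет наличие хотя бы одного gap-decreasing хода за O(N).
--     Ход M_i gap-decreasing ⟺ state[0] и state[i] «встанут» рядом
--     с правильным соседом после flip. Достаточно проверить два потенциальных
--     gap-resolving хода (Valenzano & Yang 2017, Section 6.1).
--     """
--     n = len(state)
--     if n <= 1:
--         return False
--     ext = list(state) + [n]
--     for i in range(1, n):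
--         top_val = state[0]
--         below_val = ext[i + 1] if i + 1 <= n else n
--         top_meets_below = abs(top_val - below_val) == 1
--         gap_at_i = abs(state[i] - ext[i + 1]) != 1 if i < n else abs(state[i] - n) != 1
--         if top_meets_below and gap_at_i:
--             return True
--     return False
-- ===== SOURCE B (Python) =====
-- def _has_gap_decreasing_move(state):
--     n = len(state)
--     if n <= 1:
--         return False
--     ext = list(state) + [n]
--     positions = {}
--     for j, v in enumerate(ext):
--         positions.setdefault(v, []).append(j)
--     top = state[0]
--     for key in (top + 1, top - 1):
--         for j in positions.get(key, []):
--             if j >= 2 and abs(ext[j - 1] - ext[j]) != 1: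
--                 return True
--     return False
-- ===== Notes on version B (the rewrite author's own statement) =====
-- stated objective: alternative
-- what changed: Instead of scanning every flip position i and testing both conditions there, B builds a value-to-indices dictionary over ext = state + [n] once and probes only the at-most-two candidate sites whose value is the top element plus one or minus one, checking the gap condition at those indices.
import Mathlib
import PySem

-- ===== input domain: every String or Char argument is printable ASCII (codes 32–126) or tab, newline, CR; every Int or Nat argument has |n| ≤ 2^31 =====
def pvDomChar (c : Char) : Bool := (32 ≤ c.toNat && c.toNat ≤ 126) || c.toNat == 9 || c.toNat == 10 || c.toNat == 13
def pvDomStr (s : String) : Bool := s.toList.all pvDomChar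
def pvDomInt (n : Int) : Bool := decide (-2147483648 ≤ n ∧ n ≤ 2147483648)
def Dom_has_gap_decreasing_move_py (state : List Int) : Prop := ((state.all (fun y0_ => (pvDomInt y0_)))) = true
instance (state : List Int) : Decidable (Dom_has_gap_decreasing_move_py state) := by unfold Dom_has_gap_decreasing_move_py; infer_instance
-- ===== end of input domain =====

-- B replaces A's scan over all flip positions by a value→indices dictionary over ext,
-- probing only the candidate sites whose value is state[0]±1 (objective: alternative).

-- ===== PORT A =====
def has_gap_decreasing_move_py (state : List Int) : Bool :=
  let n := state.length
  if n ≤ 1 then false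
  else
    let ext := state ++ [(n : Int)]
    (PySem.List.pyRange 1 (n : Int) 1).any (fun i =>
      let top_val := PySem.List.pyGetD state 0 0
      let below_val := if i + 1 ≤ (n : Int) then PySem.List.pyGetD ext (i + 1) 0 else (n : Int)
      let top_meets_below := (top_val - below_val).natAbs == 1
      let gap_at_i :=
        if i < (n : Int) then
          !((PySem.List.pyGetD state i 0 - PySem.List.pyGetD ext (i + 1) 0).natAbs == 1)
        else
          !((PySem.List.pyGetD state i 0 - (n : Int)).natAbs == 1)
      top_meets_below && gap_at_i)

-- ===== PORT B =====
def has_gap_decreasing_move_py_alt (state : List Int) : Bool :=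
  let n := state.length
  if n ≤ 1 then false
  else
    let ext := state ++ [(n : Int)]
    let positions : PySem.Dict Int (List Int) :=
      (PySem.List.enumerate ext 0).foldl
        (fun d p => d.modify p.2 ([] : List Int) (· ++ [p.1])) PySem.Dict.empty
    let top := PySem.List.pyGetD state 0 0
    ([top + 1, top - 1] : List Int).any (fun key =>
      (positions.getD key []).any (fun j =>
        decide (2 ≤ j) && !((PySem.List.pyGetD ext (j - 1) 0 - PySem.List.pyGetD ext j 0).natAbs == 1)))

-- ===== PRECONDITION & SPEC =====
def Spec_has_gap_decreasing_move_py (state : List Int) (out : Bool) : Prop := out = has_gap_decreasing_move_py_alt state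
instance (state : List Int) (out : Bool) : Decidable (Spec_has_gap_decreasing_move_py state out) := by unfold Spec_has_gap_decreasing_move_py; infer_instance

-- ===== CLAIM (what is proved, stated in full; the proofs are below) =====
def Claim_equal_has_gap_decreasing_move_py : Prop := ∀ (state : List Int), Dom_has_gap_decreasing_move_py state → Spec_has_gap_decreasing_move_py state (has_gap_decreasing_move_py state)

-- ===== LEMMAS AND PROOFS =====

-- the common characterisation both ports are reduced to: a site j ∈ [2, n] of ext = state ++ [n]
-- whose value neighbours state[0] and whose left neighbour does not neighbour it
def gdQ (state : List Int) (j : Int) : Prop :=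
  2 ≤ j ∧ j ≤ (state.length : Int) ∧
  (PySem.List.pyGetD state 0 0 - PySem.List.pyGetD (state ++ [(state.length : Int)]) j 0).natAbs = 1 ∧
  (PySem.List.pyGetD (state ++ [(state.length : Int)]) (j - 1) 0 - PySem.List.pyGetD (state ++ [(state.length : Int)]) j 0).natAbs ≠ 1

lemma gd_bool_eq (a b : Bool) (h : a = true ↔ b = true) : a = b := by
  revert h; cases a <;> cases b <;> decide

lemma gd_pyGetD_append (state : List Int) (x i : Int) (h0 : 0 ≤ i) (h1 : i < (state.length : Int)) :
    PySem.List.pyGetD (state ++ [x]) i 0 = PySem.List.pyGetD state i 0 := by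
  rw [PySem.List.pyGetD_eq_getElem _ _ h0 (by simp only [List.length_append, List.length_cons, List.length_nil]; omega),
      PySem.List.pyGetD_eq_getElem _ _ h0 (by omega)]
  exact List.getElem_append_left (by omega)

lemma gd_pyGetD_nat (l : List Int) (k : Nat) (hk : k < l.length) :
    PySem.List.pyGetD l (k : Int) 0 = l[k] := by
  rw [PySem.List.pyGetD_eq_getElem _ _ (by omega) (by omega)]
  simp

lemma gd_positions (l : List (Int × Int)) (d : PySem.Dict Int (List Int)) (c : Int) :
    (l.foldl (fun d p => d.modify p.2 ([] : List Int) (· ++ [p.1])) d).getD c []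
      = d.getD c [] ++ (l.filter (fun p => p.2 == c)).map (·.1) := by
  induction l generalizing d with
  | nil => simp
  | cons p t ih =>
    simp only [List.foldl_cons, ih, List.filter_cons, PySem.Dict.getD_modify]
    by_cases h : p.2 = c
    · subst h; simp
    · rw [if_neg (fun hc => h hc.symm)]; simp [h]

lemma gd_mem_positions (ext : List Int) (c j : Int) :
    j ∈ ((PySem.List.enumerate ext 0).foldl
        (fun d p => d.modify p.2 ([] : List Int) (· ++ [p.1])) PySem.Dict.empty).getD c []
      ↔ ∃ (k : Nat), ∃ (_ : k < ext.length), j = (k : Int) ∧ ext[k] = c := by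
  rw [gd_positions]
  simp only [PySem.Dict.getD_empty, List.nil_append, List.mem_map, List.mem_filter]
  constructor
  · rintro ⟨p, ⟨hp, hc⟩, rfl⟩
    rcases (PySem.List.mem_enumerate_iff _ _ _).mp hp with ⟨k, hk, rfl⟩
    exact ⟨k, hk, by simp, by simpa using hc⟩
  · rintro ⟨k, hk, rfl, hc⟩
    exact ⟨((k : Int), ext[k]), ⟨(PySem.List.mem_enumerate_iff _ _ _).mpr ⟨k, hk, by simp⟩,
      by simpa using hc⟩, rfl⟩

lemma gd_A_iff (state : List Int) (h : ¬ state.length ≤ 1) :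
    has_gap_decreasing_move_py state = true ↔ ∃ j, gdQ state j := by
  simp only [has_gap_decreasing_move_py, if_neg h, List.any_eq_true,
    PySem.List.mem_pyRange_one, Bool.and_eq_true, beq_iff_eq]
  constructor
  · rintro ⟨i, ⟨h1, h2⟩, htop, hgap⟩
    rw [if_pos (by omega : i + 1 ≤ (state.length : Int))] at htop
    rw [if_pos h2] at hgap
    refine ⟨i + 1, by omega, by omega, htop, ?_⟩
    have heq : i + 1 - 1 = i := by omega
    rw [heq, gd_pyGetD_append state _ i (by omega) (by omega)]
    simpa using hgap
  · rintro ⟨j, hj2, hjn, htop, hgap⟩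
    refine ⟨j - 1, ⟨by omega, by omega⟩, ?_, ?_⟩
    · rw [if_pos (by omega : j - 1 + 1 ≤ (state.length : Int))]
      have heq : j - 1 + 1 = j := by omega
      rw [heq]; exact htop
    · rw [if_pos (by omega : j - 1 < (state.length : Int))]
      have heq : j - 1 + 1 = j := by omega
      rw [heq, ← gd_pyGetD_append state ((state.length : Int)) (j - 1) (by omega) (by omega)]
      simpa using hgap

lemma gd_B_iff (state : List Int) (h : ¬ state.length ≤ 1) :
    has_gap_decreasing_move_py_alt state = true ↔ ∃ j, gdQ state j := by
  simp only [has_gap_decreasing_move_py_alt, if_neg h, List.any_eq_true, List.mem_cons,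
    List.not_mem_nil, or_false, gd_mem_positions, Bool.and_eq_true, decide_eq_true_eq,
    Bool.not_eq_true', beq_eq_false_iff_ne, ne_eq]
  constructor
  · rintro ⟨key, hkey, j, ⟨k, hk, rfl, hc⟩, h2, hgap⟩
    have hlen : k < state.length + 1 := by simpa using hk
    have hv : PySem.List.pyGetD (state ++ [(state.length : Int)]) (k : Int) 0
        = (state ++ [(state.length : Int)])[k] := gd_pyGetD_nat _ k hk
    refine ⟨(k : Int), h2, by omega, ?_, hgap⟩
    rw [hv, hc]
    rcases hkey with rfl | rfl <;> omega
  · rintro ⟨j, hj2, hjn, htop, hgap⟩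
    have hk : j.toNat < (state ++ [(state.length : Int)]).length := by simp; omega
    have hj : j = (j.toNat : Int) := by omega
    have hv : PySem.List.pyGetD (state ++ [(state.length : Int)]) j 0
        = (state ++ [(state.length : Int)])[j.toNat] := by
      have h' := gd_pyGetD_nat _ j.toNat hk
      rwa [Int.toNat_of_nonneg (by omega : (0:Int) ≤ j)] at h'
    set v := (state ++ [(state.length : Int)])[j.toNat] with hvdef
    have hcase : v = PySem.List.pyGetD state 0 0 + 1 ∨ v = PySem.List.pyGetD state 0 0 - 1 := by
      rw [hv] at htop; omega
    rcases hcase with hc | hc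
    · exact ⟨PySem.List.pyGetD state 0 0 + 1, Or.inl rfl, j, ⟨j.toNat, hk, hj, hc⟩, hj2, hgap⟩
    · exact ⟨PySem.List.pyGetD state 0 0 - 1, Or.inr rfl, j, ⟨j.toNat, hk, hj, hc⟩, hj2, hgap⟩

-- ===== VERDICT (by name: the statement is the Claim_ definition above) =====
theorem has_gap_decreasing_move_py_spec : Claim_equal_has_gap_decreasing_move_py := by
  intro state _
  unfold Spec_has_gap_decreasing_move_py
  by_cases h : state.length ≤ 1
  · simp [has_gap_decreasing_move_py, has_gap_decreasing_move_py_alt, h]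
  · exact gd_bool_eq _ _ ((gd_A_iff state h).trans (gd_B_iff state h).symm)
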